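-- pv_equiv track=rewrite | github.com/Shlobro/agent-loop | src/utils/json_parser.py | _strip_common_line_prefix
-- ===== SOURCE A (Python) =====
-- def _strip_common_line_prefix(text: str) -> str:
--     lines = text.splitlines()
--     non_empty = [line for line in lines if line.strip()]
--     if not non_empty:
--         return text
--     prefixes = ("| ", "│ ", "> ", "» ")
--     for prefix in prefixes:
--         if all(line.lstrip().startswith(prefix) for line in non_empty):
--             stripped_lines = []
--             for line in lines:
--                 if not line.strip():
--                     stripped_lines.append(line)
--                     continue
--                 line_stripped = line.lstrip()
--                 stripped_lines.append(line_stripped[len(prefix):])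
--             return "\n".join(stripped_lines)
--     return text
-- ===== SOURCE B (Python) =====
-- def _strip_common_line_prefix(text: str) -> str:
--     lines = text.splitlines()
--     prefixes = ("| ", "│ ", "> ", "» ")
--     common = None
--     for line in lines:
--         if not line.strip():
--             continue
--         s = line.lstrip()
--         hit = next((p for p in prefixes if s.startswith(p)), None)
--         if hit is None or (common is not None and common != hit):
--             return text
--         common = hit
--     if common is None:
--         return text
--     return "\n".join(
--         line if not line.strip() else line.lstrip()[len(common):]
--         for line in lines
--     )
-- ===== Notes on version B (the rewrite author's own statement) =====
-- stated objective: alternative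
-- what changed: A tries each of the four quote prefixes in turn, re-scanning all non-empty lines with all() per prefix; B makes a single detection pass that classifies each non-empty line by the one prefix it starts with and early-returns on any mismatch, then rebuilds once.
import Mathlib
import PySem

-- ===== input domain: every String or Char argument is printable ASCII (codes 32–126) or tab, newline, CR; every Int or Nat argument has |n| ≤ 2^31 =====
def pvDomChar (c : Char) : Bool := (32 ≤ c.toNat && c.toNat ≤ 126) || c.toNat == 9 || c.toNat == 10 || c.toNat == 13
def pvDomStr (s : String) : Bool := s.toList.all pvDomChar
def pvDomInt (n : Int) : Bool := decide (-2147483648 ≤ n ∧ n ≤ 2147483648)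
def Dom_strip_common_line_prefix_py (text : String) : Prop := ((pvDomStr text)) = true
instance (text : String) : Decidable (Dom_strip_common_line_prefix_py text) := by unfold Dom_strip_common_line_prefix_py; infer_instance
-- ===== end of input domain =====

-- B replaces A's four repeated all()-scans over the prefix tuple by a single classification
-- pass that records the one prefix each non-blank line starts with (objective: alternative).

-- ===== PORT A =====
def pvPrefixes : List String := ["| ", "│ ", "> ", "» "]

-- the body of A's successful branch: rebuild the lines with `prefix` removed (accumulator loop, as in A)
def pvRebuildA (lines : List String) (p : String) : String :=
  PySem.Str.join "\n"
    (lines.foldl (fun acc line =>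
      if PySem.Str.strip line != "" then
        acc ++ [PySem.Str.slice (PySem.Str.lstrip line) (some (PySem.Str.len p)) none]
      else acc ++ [line]) [])

-- A's `for prefix in prefixes:` loop with its early `return`
def pvALoop (text : String) (lines nonEmpty : List String) : List String → String
  | [] => text
  | p :: ps =>
      if nonEmpty.all (fun line => PySem.Str.startswith (PySem.Str.lstrip line) p) then
        pvRebuildA lines p
      else pvALoop text lines nonEmpty ps

def strip_common_line_prefix_py (text : String) : String :=
  let lines := PySem.Str.splitlines text
  let nonEmpty := lines.filter (fun line => PySem.Str.strip line != "")
  if nonEmpty = [] then text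
  else pvALoop text lines nonEmpty pvPrefixes

-- ===== PORT B =====
-- B's `next((p for p in prefixes if s.startswith(p)), None)`
def pvClassify (s : String) : Option String :=
  pvPrefixes.find? (fun p => PySem.Str.startswith s p)

-- B's single detection pass with its early `return text` (none = early return,
-- some common = loop finished with this common prefix so far)
def pvBScan : List String → Option String → Option (Option String)
  | [], common => some common
  | line :: rest, common =>
      if PySem.Str.strip line != "" then
        match pvClassify (PySem.Str.lstrip line) with
        | none => none
        | some hit =>
            if common.isSome && common != some hit then none
            else pvBScan rest (some hit)
      else pvBScan rest common

def strip_common_line_prefix_py_alt (text : String) : String :=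
  let lines := PySem.Str.splitlines text
  match pvBScan lines none with
  | some (some common) =>
      PySem.Str.join "\n"
        (lines.map (fun line =>
          if PySem.Str.strip line != "" then
            PySem.Str.slice (PySem.Str.lstrip line) (some (PySem.Str.len common)) none
          else line))
  | _ => text

-- ===== PRECONDITION & SPEC =====
def Spec_strip_common_line_prefix_py (text : String) (out : String) : Prop := out = strip_common_line_prefix_py_alt text
instance (text : String) (out : String) : Decidable (Spec_strip_common_line_prefix_py text out) := by unfold Spec_strip_common_line_prefix_py; infer_instance

-- ===== CLAIM (what is proved, stated in full; the proofs are below) =====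
def Claim_equal_strip_common_line_prefix_py : Prop := ∀ (text : String), Dom_strip_common_line_prefix_py text → Spec_strip_common_line_prefix_py text (strip_common_line_prefix_py text)

-- ===== LEMMAS AND PROOFS =====

-- every candidate prefix is two characters long
lemma pvPrefixes_len : ∀ p ∈ pvPrefixes, p.toList.length = 2 := by decide

-- two candidate prefixes of the same string are equal
lemma pvUnique {p q s : String} (hp : p ∈ pvPrefixes) (hq : q ∈ pvPrefixes)
    (h1 : PySem.Str.startswith s p = true) (h2 : PySem.Str.startswith s q = true) : p = q := by
  simp only [PySem.Str.startswith_eq, PySem.Chars.startswith_iff] at h1 h2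
  have hlen : p.toList.length = q.toList.length := by
    rw [pvPrefixes_len p hp, pvPrefixes_len q hq]
  rcases List.prefix_or_prefix_of_prefix h1 h2 with h | h
  · exact String.toList_injective (h.eq_of_length hlen)
  · exact (String.toList_injective (h.eq_of_length hlen.symm)).symm

lemma pvClassify_mem {s p : String} (h : pvClassify s = some p) :
    p ∈ pvPrefixes ∧ PySem.Str.startswith s p = true :=
  ⟨List.mem_of_find?_eq_some h, List.find?_some h⟩

lemma pvClassify_eq {s p : String} (hp : p ∈ pvPrefixes)
    (h : PySem.Str.startswith s p = true) : pvClassify s = some p := by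
  have hsome : (pvClassify s).isSome := List.find?_isSome.mpr ⟨p, hp, h⟩
  obtain ⟨q, hq⟩ := Option.isSome_iff_exists.mp hsome
  obtain ⟨hqm, hqs⟩ := pvClassify_mem hq
  rw [hq, pvUnique hqm hp hqs h]

-- scanning blank-only lines keeps the accumulator
lemma pvBScan_blank {ls : List String} (h : ∀ l ∈ ls, (PySem.Str.strip l != "") = false) :
    ∀ c, pvBScan ls c = some c := by
  induction ls with
  | nil => intro c; rfl
  | cons l rest ih =>
      intro c
      simp only [pvBScan, h l (by simp), Bool.false_eq_true, if_false]
      exact ih (fun x hx => h x (by simp [hx])) c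

lemma pvBScan_some_sound {ls : List String} {c : String} {d : Option String}
    (h : pvBScan ls (some c) = some d) :
    d = some c ∧ ∀ l ∈ ls, (PySem.Str.strip l != "") = true → pvClassify (PySem.Str.lstrip l) = some c := by
  induction ls generalizing c with
  | nil => simp only [pvBScan, Option.some.injEq] at h; exact ⟨h.symm, by simp⟩
  | cons l rest ih =>
      by_cases hb : (PySem.Str.strip l != "") = true
      · simp only [pvBScan, hb, if_true] at h
        cases hcl : pvClassify (PySem.Str.lstrip l) with
        | none => rw [hcl] at h; cases h
        | some hit =>
            rw [hcl] at h; dsimp only at h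
            by_cases hec : c = hit
            · subst hec
              simp only [Option.isSome_some, bne_self_eq_false, Bool.and_false,
                Bool.false_eq_true, if_false] at h
              obtain ⟨hd, hall⟩ := ih h
              refine ⟨hd, fun x hx hxb => ?_⟩
              rcases List.mem_cons.mp hx with rfl | hx'
              · exact hcl
              · exact hall x hx' hxb
            · rw [if_pos (by simp [bne_iff_ne, hec])] at h; cases h
      · simp only [Bool.not_eq_true] at hb
        simp only [pvBScan, hb, Bool.false_eq_true, if_false] at h
        obtain ⟨hd, hall⟩ := ih h
        refine ⟨hd, fun x hx hxb => ?_⟩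
        rcases List.mem_cons.mp hx with rfl | hx'
        · rw [hb] at hxb; cases hxb
        · exact hall x hx' hxb

lemma pvBScan_none_sound {ls : List String} {c : String}
    (h : pvBScan ls none = some (some c)) :
    (∃ l ∈ ls, (PySem.Str.strip l != "") = true) ∧
      ∀ l ∈ ls, (PySem.Str.strip l != "") = true → pvClassify (PySem.Str.lstrip l) = some c := by
  induction ls with
  | nil => cases h
  | cons l rest ih =>
      by_cases hb : (PySem.Str.strip l != "") = true
      · simp only [pvBScan, hb, if_true] at h
        cases hcl : pvClassify (PySem.Str.lstrip l) with
        | none => rw [hcl] at h; cases h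
        | some hit =>
            rw [hcl] at h; dsimp only at h
            rw [if_neg (by simp)] at h
            obtain ⟨hd, hall⟩ := pvBScan_some_sound h
            have hhit : hit = c := by simpa using hd.symm
            subst hhit
            refine ⟨⟨l, by simp, hb⟩, fun x hx hxb => ?_⟩
            rcases List.mem_cons.mp hx with rfl | hx'
            · exact hcl
            · exact hall x hx' hxb
      · simp only [Bool.not_eq_true] at hb
        simp only [pvBScan, hb, Bool.false_eq_true, if_false] at h
        obtain ⟨⟨w, hw, hwb⟩, hall⟩ := ih h
        refine ⟨⟨w, by simp [hw], hwb⟩, fun x hx hxb => ?_⟩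
        rcases List.mem_cons.mp hx with rfl | hx'
        · rw [hb] at hxb; cases hxb
        · exact hall x hx' hxb

lemma pvBScan_some_complete {ls : List String} {c : String}
    (h : ∀ l ∈ ls, (PySem.Str.strip l != "") = true → pvClassify (PySem.Str.lstrip l) = some c) :
    pvBScan ls (some c) = some (some c) := by
  induction ls with
  | nil => rfl
  | cons l rest ih =>
      by_cases hb : (PySem.Str.strip l != "") = true
      · simp only [pvBScan, hb, if_true]
        rw [h l (by simp) hb]; dsimp only
        rw [if_neg (by simp)]
        exact ih (fun x hx => h x (by simp [hx]))
      · simp only [Bool.not_eq_true] at hb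
        simp only [pvBScan, hb, Bool.false_eq_true, if_false]
        exact ih (fun x hx => h x (by simp [hx]))

lemma pvBScan_none_complete {ls : List String} {c : String}
    (hex : ∃ l ∈ ls, (PySem.Str.strip l != "") = true)
    (h : ∀ l ∈ ls, (PySem.Str.strip l != "") = true → pvClassify (PySem.Str.lstrip l) = some c) :
    pvBScan ls none = some (some c) := by
  induction ls with
  | nil => obtain ⟨_, hm, _⟩ := hex; cases hm
  | cons l rest ih =>
      by_cases hb : (PySem.Str.strip l != "") = true
      · simp only [pvBScan, hb, if_true]
        rw [h l (by simp) hb]; dsimp only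
        rw [if_neg (by simp)]
        exact pvBScan_some_complete (fun x hx => h x (by simp [hx]))
      · simp only [Bool.not_eq_true] at hb
        simp only [pvBScan, hb, Bool.false_eq_true, if_false]
        obtain ⟨w, hw, hwb⟩ := hex
        rcases List.mem_cons.mp hw with rfl | hw'
        · rw [hb] at hwb; cases hwb
        · exact ih ⟨w, hw', hwb⟩ (fun x hx => h x (by simp [hx]))

-- A's accumulator rebuild equals B's map rebuild
lemma pvRebuild_eq (lines : List String) (p : String) :
    pvRebuildA lines p =
      PySem.Str.join "\n"
        (lines.map (fun line =>
          if PySem.Str.strip line != "" then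
            PySem.Str.slice (PySem.Str.lstrip line) (some (PySem.Str.len p)) none
          else line)) := by
  unfold pvRebuildA
  congr 1
  have key : ∀ (acc : List String),
      lines.foldl (fun acc line =>
        if PySem.Str.strip line != "" then
          acc ++ [PySem.Str.slice (PySem.Str.lstrip line) (some (PySem.Str.len p)) none]
        else acc ++ [line]) acc =
      acc ++ lines.map (fun line =>
        if PySem.Str.strip line != "" then
          PySem.Str.slice (PySem.Str.lstrip line) (some (PySem.Str.len p)) none
        else line) := by
    induction lines with
    | nil => simp
    | cons l rest ih =>
        intro acc
        simp only [List.foldl_cons, List.map_cons]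
        by_cases hb : (PySem.Str.strip l != "") = true
        · rw [if_pos hb, if_pos hb, ih]; simp
        · rw [if_neg hb, if_neg hb, ih]; simp
  simpa using key []

-- if no candidate prefix works for all non-empty lines, A's prefix loop falls through
lemma pvALoop_fail {text : String} {lines nonEmpty : List String} {ps : List String}
    (h : ∀ p ∈ ps, ¬ nonEmpty.all (fun line => PySem.Str.startswith (PySem.Str.lstrip line) p) = true) :
    pvALoop text lines nonEmpty ps = text := by
  induction ps with
  | nil => rfl
  | cons p rest ih =>
      simp only [pvALoop]
      rw [if_neg (h p (by simp))]
      exact ih (fun q hq => h q (by simp [hq]))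

-- if a (necessarily unique) candidate prefix works, A's loop strips it
lemma pvALoop_success {text : String} {lines nonEmpty : List String} {ps : List String} {p : String}
    (hsub : ps ⊆ pvPrefixes) (hp : p ∈ ps)
    (hgood : nonEmpty.all (fun line => PySem.Str.startswith (PySem.Str.lstrip line) p) = true)
    (hne : nonEmpty ≠ []) :
    pvALoop text lines nonEmpty ps = pvRebuildA lines p := by
  induction ps with
  | nil => cases hp
  | cons q rest ih =>
      simp only [pvALoop]
      by_cases hq : nonEmpty.all (fun line => PySem.Str.startswith (PySem.Str.lstrip line) q) = true
      · rw [if_pos hq]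
        obtain ⟨l, hl⟩ := List.exists_mem_of_ne_nil nonEmpty hne
        have h1 := List.all_eq_true.mp hgood l hl
        have h2 := List.all_eq_true.mp hq l hl
        rw [pvUnique (hsub (by simp)) (hsub hp) h2 h1]
      · rw [if_neg hq]
        rcases List.mem_cons.mp hp with rfl | hp'
        · exact absurd hgood hq
        · exact ih (fun x hx => hsub (by simp [hx])) hp'

-- ===== VERDICT (by name: the statement is the Claim_ definition above) =====
theorem strip_common_line_prefix_py_spec : Claim_equal_strip_common_line_prefix_py := by
  intro text _
  unfold Spec_strip_common_line_prefix_py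
  simp only [strip_common_line_prefix_py, strip_common_line_prefix_py_alt]
  generalize PySem.Str.splitlines text = lines
  set nonEmpty := lines.filter (fun line => PySem.Str.strip line != "") with hneDef
  by_cases hne : nonEmpty = []
  · -- all lines blank: both sides return text
    rw [if_pos hne]
    have hblank : ∀ l ∈ lines, (PySem.Str.strip l != "") = false := by
      intro l hl
      by_contra hcon
      have hcon' : (PySem.Str.strip l != "") = true := by
        cases hx : (PySem.Str.strip l != "") with
        | false => exact absurd hx hcon
        | true => rfl
      have : l ∈ nonEmpty := List.mem_filter.mpr ⟨hl, hcon'⟩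
      simp [hne] at this
    rw [pvBScan_blank hblank none]
  · rw [if_neg hne]
    obtain ⟨w, hw⟩ := List.exists_mem_of_ne_nil nonEmpty hne
    have hwl : w ∈ lines := (List.mem_filter.mp hw).1
    have hwb : (PySem.Str.strip w != "") = true := (List.mem_filter.mp hw).2
    by_cases hgood : ∃ p ∈ pvPrefixes,
        nonEmpty.all (fun line => PySem.Str.startswith (PySem.Str.lstrip line) p) = true
    · obtain ⟨p, hpm, hpg⟩ := hgood
      rw [pvALoop_success (fun x hx => hx) hpm hpg hne]
      have hcl : ∀ l ∈ lines, (PySem.Str.strip l != "") = true →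
          pvClassify (PySem.Str.lstrip l) = some p := by
        intro l hl hlb
        have hmem : l ∈ nonEmpty := List.mem_filter.mpr ⟨hl, hlb⟩
        exact pvClassify_eq hpm (List.all_eq_true.mp hpg l hmem)
      rw [pvBScan_none_complete ⟨w, hwl, hwb⟩ hcl]
      exact pvRebuild_eq lines p
    · rw [pvALoop_fail (fun p hpm hpg => hgood ⟨p, hpm, hpg⟩)]
      cases hscan : pvBScan lines none with
      | none => rfl
      | some d =>
          cases d with
          | none => rfl
          | some c =>
              exfalso
              obtain ⟨_, hall⟩ := pvBScan_none_sound hscan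
              refine hgood ⟨c, (pvClassify_mem (hall w hwl hwb)).1, List.all_eq_true.mpr ?_⟩
              intro l hl
              obtain ⟨hll, hlb⟩ := List.mem_filter.mp hl
              exact (pvClassify_mem (hall l hll hlb)).2
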